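-- pv_equiv track=rewrite | github.com/frankqwang/sts2-ai | STS2AI/Python/test_simulator_consistency.py | classify_summary_diffs
-- ===== SOURCE A (Python) =====
-- def classify_summary_diffs(diffs: list[str]) -> str:
-- 	if any(entry.startswith("display.") for entry in diffs):
-- 		return "display_divergence"
-- 	if any(entry.startswith(("state_type:", "floor:", "act:", "terminal:", "run_outcome:")) for entry in diffs):
-- 		return "state_transition"
-- 	if any(entry.startswith(("legal_actions:", "player.", "enemies:", "hand_cards:", "deck_cards:", "relics:", "potions:")) or "_payload:" in entry for entry in diffs):
-- 		return "payload_divergence"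
-- 	return "representation_only"
-- ===== SOURCE B (Python) =====
-- _STATE_PREFIXES = ("state_type:", "floor:", "act:", "terminal:", "run_outcome:")
-- _PAYLOAD_PREFIXES = ("legal_actions:", "player.", "enemies:", "hand_cards:",
--                      "deck_cards:", "relics:", "potions:")
-- _LABELS = ("representation_only", "payload_divergence",
--            "state_transition", "display_divergence")
--
--
-- def _severity(entry):
--     # Numeric rank of the single most severe category this entry belongs to.
--     if entry.startswith("display."):
--         return 3
--     if entry.startswith(_STATE_PREFIXES):
--         return 2
--     if entry.startswith(_PAYLOAD_PREFIXES) or "_payload:" in entry: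
--         return 1
--     return 0
--
--
-- def classify_summary_diffs(diffs: list[str]) -> str:
--     # Rank every entry, take the maximum rank, and look the label up in a table.
--     return _LABELS[max(map(_severity, diffs), default=0)]
-- ===== Notes on version B (the rewrite author's own statement) =====
-- stated objective: alternative
-- what changed: Replaced A's three short-circuiting any() scans by assigning each entry a numeric severity rank, folding max over one pass, and indexing a label table with the maximum rank.
import Mathlib
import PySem

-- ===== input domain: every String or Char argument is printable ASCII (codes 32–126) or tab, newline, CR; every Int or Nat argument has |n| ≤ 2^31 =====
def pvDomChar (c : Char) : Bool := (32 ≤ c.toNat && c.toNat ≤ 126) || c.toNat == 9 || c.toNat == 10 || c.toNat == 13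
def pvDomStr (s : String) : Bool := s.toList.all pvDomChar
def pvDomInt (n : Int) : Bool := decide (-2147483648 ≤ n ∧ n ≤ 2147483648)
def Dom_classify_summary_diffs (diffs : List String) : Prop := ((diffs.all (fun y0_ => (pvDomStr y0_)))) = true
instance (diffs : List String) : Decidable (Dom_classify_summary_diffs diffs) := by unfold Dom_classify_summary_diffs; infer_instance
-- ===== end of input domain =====

-- B ranks each entry with a numeric severity, folds max over one pass, and indexes a
-- label table with the maximum rank, instead of A's three short-circuiting any() scans
-- (objective: alternative decomposition).


-- ===== PORT A =====
def classify_summary_diffs (diffs : List String) : String :=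
  if diffs.any (fun entry => PySem.Str.startswith entry "display.") then "display_divergence"
  else if diffs.any (fun entry =>
      PySem.Str.startswith entry "state_type:" || PySem.Str.startswith entry "floor:" ||
      PySem.Str.startswith entry "act:" || PySem.Str.startswith entry "terminal:" ||
      PySem.Str.startswith entry "run_outcome:") then "state_transition"
  else if diffs.any (fun entry =>
      (PySem.Str.startswith entry "legal_actions:" || PySem.Str.startswith entry "player." ||
       PySem.Str.startswith entry "enemies:" || PySem.Str.startswith entry "hand_cards:" ||
       PySem.Str.startswith entry "deck_cards:" || PySem.Str.startswith entry "relics:" ||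
       PySem.Str.startswith entry "potions:") || PySem.Str.isIn "_payload:" entry) then "payload_divergence"
  else "representation_only"

-- ===== PORT B =====
def pvStatePrefixes : List String :=
  ["state_type:", "floor:", "act:", "terminal:", "run_outcome:"]
def pvPayloadPrefixes : List String :=
  ["legal_actions:", "player.", "enemies:", "hand_cards:", "deck_cards:", "relics:", "potions:"]
def pvLabels : List String :=
  ["representation_only", "payload_divergence", "state_transition", "display_divergence"]

-- numeric rank of the single most severe category an entry belongs to
def pvSeverity (entry : String) : Int :=
  if PySem.Str.startswith entry "display." then 3
  else if pvStatePrefixes.any (fun p => PySem.Str.startswith entry p) then 2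
  else if pvPayloadPrefixes.any (fun p => PySem.Str.startswith entry p)
          || PySem.Str.isIn "_payload:" entry then 1
  else 0

def classify_summary_diffs_alt (diffs : List String) : String :=
  -- max(map(_severity, diffs), default=0), then a table index (rank is always 0..3)
  ((PySem.List.pyGet? pvLabels
      (diffs.foldl (fun acc entry => max acc (pvSeverity entry)) 0)).getD "")

-- ===== PRECONDITION & SPEC =====
def Spec_classify_summary_diffs (diffs : List String) (out : String) : Prop := out = classify_summary_diffs_alt diffs
instance (diffs : List String) (out : String) : Decidable (Spec_classify_summary_diffs diffs out) := by unfold Spec_classify_summary_diffs; infer_instance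

-- ===== CLAIM (what is proved, stated in full; the proofs are below) =====
def Claim_equal_classify_summary_diffs : Prop := ∀ (diffs : List String), Dom_classify_summary_diffs diffs → Spec_classify_summary_diffs diffs (classify_summary_diffs diffs)

-- ===== LEMMAS AND PROOFS =====

-- hoisting a nonnegative accumulator out of the max-fold
theorem foldl_max_acc (diffs : List String) (a : Int) (h : 0 ≤ a) :
    diffs.foldl (fun acc entry => max acc (pvSeverity entry)) a
      = max a (diffs.foldl (fun acc entry => max acc (pvSeverity entry)) 0) := by
  induction diffs generalizing a with
  | nil => simp; omega
  | cons e rest ih =>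
    simp only [List.foldl_cons]
    rw [ih (max a (pvSeverity e)) (le_trans h (le_max_left _ _)),
        ih (max 0 (pvSeverity e)) (le_max_left _ _)]
    omega

-- pvSeverity written with A's inline disjunctions (same tests, different grouping)
theorem sev_eq (e : String) :
    pvSeverity e =
      (if PySem.Str.startswith e "display." then 3
       else if (PySem.Str.startswith e "state_type:" || PySem.Str.startswith e "floor:" ||
                PySem.Str.startswith e "act:" || PySem.Str.startswith e "terminal:" ||
                PySem.Str.startswith e "run_outcome:") then 2
       else if ((PySem.Str.startswith e "legal_actions:" || PySem.Str.startswith e "player." ||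
                 PySem.Str.startswith e "enemies:" || PySem.Str.startswith e "hand_cards:" ||
                 PySem.Str.startswith e "deck_cards:" || PySem.Str.startswith e "relics:" ||
                 PySem.Str.startswith e "potions:") || PySem.Str.isIn "_payload:" e) then 1
       else 0) := by
  simp only [pvSeverity, pvStatePrefixes, pvPayloadPrefixes, List.any_cons, List.any_nil,
    Bool.or_false, Bool.or_assoc]

set_option maxHeartbeats 1600000 in
-- the maximum severity equals A's three-way nested any() decision, as a number
theorem fold_eq_rank (diffs : List String) :
    diffs.foldl (fun acc entry => max acc (pvSeverity entry)) 0
      = (if diffs.any (fun entry => PySem.Str.startswith entry "display.") then 3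
         else if diffs.any (fun entry =>
             PySem.Str.startswith entry "state_type:" || PySem.Str.startswith entry "floor:" ||
             PySem.Str.startswith entry "act:" || PySem.Str.startswith entry "terminal:" ||
             PySem.Str.startswith entry "run_outcome:") then 2
         else if diffs.any (fun entry =>
             (PySem.Str.startswith entry "legal_actions:" || PySem.Str.startswith entry "player." ||
              PySem.Str.startswith entry "enemies:" || PySem.Str.startswith entry "hand_cards:" ||
              PySem.Str.startswith entry "deck_cards:" || PySem.Str.startswith entry "relics:" ||
              PySem.Str.startswith entry "potions:") || PySem.Str.isIn "_payload:" entry) then 1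
         else 0) := by
  induction diffs with
  | nil => simp
  | cons e rest ih =>
    simp only [List.foldl_cons, List.any_cons]
    rw [foldl_max_acc rest (max 0 (pvSeverity e)) (le_max_left _ _), ih, sev_eq]
    by_cases e1 : PySem.Str.startswith e "display." = true <;>
    by_cases e2 : (PySem.Str.startswith e "state_type:" || PySem.Str.startswith e "floor:" ||
        PySem.Str.startswith e "act:" || PySem.Str.startswith e "terminal:" ||
        PySem.Str.startswith e "run_outcome:") = true <;>
    by_cases e3 : ((PySem.Str.startswith e "legal_actions:" || PySem.Str.startswith e "player." ||
        PySem.Str.startswith e "enemies:" || PySem.Str.startswith e "hand_cards:" ||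
        PySem.Str.startswith e "deck_cards:" || PySem.Str.startswith e "relics:" ||
        PySem.Str.startswith e "potions:") || PySem.Str.isIn "_payload:" e) = true <;>
    by_cases b1 : rest.any (fun entry => PySem.Str.startswith entry "display.") = true <;>
    by_cases b2 : rest.any (fun entry =>
        PySem.Str.startswith entry "state_type:" || PySem.Str.startswith entry "floor:" ||
        PySem.Str.startswith entry "act:" || PySem.Str.startswith entry "terminal:" ||
        PySem.Str.startswith entry "run_outcome:") = true <;>
    by_cases b3 : rest.any (fun entry =>
        (PySem.Str.startswith entry "legal_actions:" || PySem.Str.startswith entry "player." ||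
         PySem.Str.startswith entry "enemies:" || PySem.Str.startswith entry "hand_cards:" ||
         PySem.Str.startswith entry "deck_cards:" || PySem.Str.startswith entry "relics:" ||
         PySem.Str.startswith entry "potions:") || PySem.Str.isIn "_payload:" entry) = true <;>
    simp only [e1, e2, e3, b1, b2, b3, Bool.not_eq_true] at e1 e2 e3 b1 b2 b3 ⊢ <;>
    simp only [e1, e2, e3, b1, b2, b3, Bool.true_or, Bool.false_or, Bool.or_true, Bool.or_false,
      if_true, if_false, Bool.true_eq_false, Bool.false_eq_true] <;>
    norm_num

theorem classify_summary_diffs_spec : Claim_equal_classify_summary_diffs := by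
  intro diffs _
  unfold Spec_classify_summary_diffs classify_summary_diffs classify_summary_diffs_alt
  rw [fold_eq_rank]
  split_ifs <;> rfl
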